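-- pv_equiv track=rewrite | github.com/bansakdo/Algorithm | programmers/6. Greedy/2. 조이스틱.py | solution
-- ===== SOURCE A (Python) =====
-- def solution(name):
--     alphabet_number = [min(ord(i) - ord("A"), ord("Z") - ord(i)+1) for i in name]
--     idx, answer = 0, 0
--     while True:
--         answer += alphabet_number[idx]
--         alphabet_number[idx] = 0
--         if not any(alphabet_number):
--             break
--         lt, rt = 1, 1
--         while alphabet_number[idx - lt] == 0:
--             lt += 1
--         while alphabet_number[idx + rt] == 0:
--             rt += 1
--         if lt < rt:
--             answer += lt
--             idx -= lt
--         else: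
--             answer += rt
--             idx += rt
--
--     return answer
--
-- name = "JABBBBCCCZC"
-- ===== SOURCE B (Python) =====
-- def solution(name):
--     n = len(name)
--     vals = [min(ord(c) - ord("A"), ord("Z") - ord(c) + 1) for c in name]
--     answer = sum(vals)
--     rem = [i for i in range(n) if vals[i] != 0 and i != 0]
--     p = 0
--     while rem:
--         lt = min((p - q) % n for q in rem)
--         rt = min((q - p) % n for q in rem)
--         if lt < rt:
--             answer += lt
--             p = (p - lt) % n
--         else:
--             answer += rt
--             p = (p + rt) % n
--         rem.remove(p)
--     return answer
-- ===== Notes on version B (the rewrite author's own statement) =====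
-- stated objective: alternative
-- what changed: A mutates the value array and finds each nearest nonzero cell by stepping one index at a time (with Python negative-index wraparound); B sums all vertical costs upfront and keeps only the set of remaining nonzero positions, picking each move as the minimum circular distance over that shrinking set.
import Mathlib
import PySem

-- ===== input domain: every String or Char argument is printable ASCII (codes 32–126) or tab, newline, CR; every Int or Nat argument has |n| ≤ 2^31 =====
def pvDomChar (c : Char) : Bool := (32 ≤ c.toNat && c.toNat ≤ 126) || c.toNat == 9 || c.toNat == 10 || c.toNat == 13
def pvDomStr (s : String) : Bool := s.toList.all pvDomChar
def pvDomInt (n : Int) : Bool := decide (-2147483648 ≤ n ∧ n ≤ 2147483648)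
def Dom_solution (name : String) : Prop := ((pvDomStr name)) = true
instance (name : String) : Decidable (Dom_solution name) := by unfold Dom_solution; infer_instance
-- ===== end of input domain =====

-- B replaces A's cell-by-cell scanning of the mutated array with min-distance queries over the
-- shrinking set of remaining nonzero positions (values summed upfront): objective 'alternative'.


-- ===== PORT A =====
-- alphabet_number = [min(ord(i) - ord("A"), ord("Z") - ord(i)+1) for i in name]
def solNumsA (name : String) : List Int :=
  name.toList.map (fun c => min ((c.toNat : Int) - 65) (90 - (c.toNat : Int) + 1))

-- while alphabet_number[idx - lt] == 0: lt += 1   (fuel-bounded; 'none' = IndexError)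
def scanLt (v : List Int) (idx : Int) : Nat → Int → Option Int
  | 0, _ => none
  | f+1, lt =>
    match PySem.List.pyGet? v (idx - lt) with
    | none => none
    | some x => if x == 0 then scanLt v idx f (lt + 1) else some lt

-- while alphabet_number[idx + rt] == 0: rt += 1
def scanRt (v : List Int) (idx : Int) : Nat → Int → Option Int
  | 0, _ => none
  | f+1, rt =>
    match PySem.List.pyGet? v (idx + rt) with
    | none => none
    | some x => if x == 0 then scanRt v idx f (rt + 1) else some rt

-- the 'while True' loop; fuel n+1 suffices (each later iteration zeroes one nonzero cell);
-- the 'none' fallthroughs are Python's IndexError exits (proved unreachable under Pre_)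
def loopA : Nat → List Int → Int → Int → Int
  | 0, _, _, ans => ans
  | f+1, v, idx, ans =>
    match PySem.List.pyGet? v idx with
    | none => ans
    | some x =>
      match PySem.List.pySet? v idx 0 with
      | none => ans + x
      | some v' =>
        if v'.any (fun y => y != 0) then
          match scanLt v' idx (2 * v'.length + 2) 1, scanRt v' idx (2 * v'.length + 2) 1 with
          | some lt, some rt =>
            if lt < rt then loopA f v' (idx - lt) (ans + x + lt)
            else loopA f v' (idx + rt) (ans + x + rt)
          | _, _ => ans + x
        else ans + x

def solution (name : String) : Int :=
  loopA (name.toList.length + 1) (solNumsA name) 0 0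

-- ===== PORT B =====
-- while rem: lt = min((p-q)%n for q in rem); rt = min((q-p)%n for q in rem); move; rem.remove(p)
def loopB : Nat → Int → List Int → Int → Int → Int
  | 0, _, _, _, ans => ans
  | f+1, n, rem, p, ans =>
    if rem.isEmpty then ans
    else
      match PySem.List.min? (rem.map (fun q => PySem.Int.mod (p - q) n)) (fun x => x),
            PySem.List.min? (rem.map (fun q => PySem.Int.mod (q - p) n)) (fun x => x) with
      | some lt, some rt =>
        if lt < rt then
          let p' := PySem.Int.mod (p - lt) n
          match PySem.List.remove? rem p' with
          | some rem' => loopB f n rem' p' (ans + lt)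
          | none => ans
        else
          let p' := PySem.Int.mod (p + rt) n
          match PySem.List.remove? rem p' with
          | some rem' => loopB f n rem' p' (ans + rt)
          | none => ans
      | _, _ => ans

def solution_alt (name : String) : Int :=
  let n : Int := (name.toList.length : Int)
  let vals := name.toList.map (fun c => min ((c.toNat : Int) - 65) (90 - (c.toNat : Int) + 1))
  let rem := (PySem.List.pyRange 0 n 1).filter (fun i => PySem.List.pyGetD vals i 0 != 0 && i != 0)
  loopB (rem.length + 1) n rem 0 vals.sum

-- ===== PRECONDITION & SPEC =====
-- Pre_ excludes only the empty string, on which A raises IndexError (alphabet_number[0]).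
def Pre_solution (name : String) : Prop := name ≠ ""
instance (name : String) : Decidable (Pre_solution name) := by unfold Pre_solution; infer_instance
def pvWitness_solution : String := "BA"

def Spec_solution (name : String) (out : Int) : Prop := out = solution_alt name
instance (name : String) (out : Int) : Decidable (Spec_solution name out) := by unfold Spec_solution; infer_instance

-- ===== CLAIM (what is proved, stated in full; the proofs are below) =====
def Claim_equal_solution : Prop := ∀ (name : String), Dom_solution name → Pre_solution name → Spec_solution name (solution name)

-- ===== LEMMAS AND PROOFS =====

-- small emod facts (divisor n, values already in (-n, n))
lemma emod_small {n a : Int} (h0 : 0 ≤ a) (h1 : a < n) : a % n = a := Int.emod_eq_of_lt h0 h1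

lemma emod_small_neg {n a : Int} (h0 : -n ≤ a) (h1 : a < 0) : a % n = a + n := by
  rw [← Int.add_emod_right a n, emod_small (by omega) (by omega)]

lemma sub_emod_congr {n a b c : Int} (h : a % n = b % n) : (a - c) % n = (b - c) % n := by
  rw [Int.sub_emod a c n, Int.sub_emod b c n, h]

lemma sub_emod_congr' {n a b c : Int} (h : a % n = b % n) : (c - a) % n = (c - b) % n := by
  rw [Int.sub_emod c a n, Int.sub_emod c b n, h]

lemma add_emod_congr {n a b c : Int} (h : a % n = b % n) : (a + c) % n = (b + c) % n := by
  rw [Int.add_emod a c n, Int.add_emod b c n, h]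

lemma add_emod_congr' {n a b c : Int} (h : a % n = b % n) : (c + a) % n = (c + b) % n := by
  rw [Int.add_emod c a n, Int.add_emod c b n, h]

-- Python indexing at an in-range index i is lookup at (i % len)
lemma pyIdx?_eq (len : Nat) (i : Int) (h1 : -(len:Int) ≤ i) (h2 : i < (len:Int)) :
    PySem.List.pyIdx? len i = some (i % (len:Int)).toNat := by
  simp only [PySem.List.pyIdx?]
  by_cases h : 0 ≤ i
  · rw [if_pos h, if_pos h2, emod_small h h2]
  · rw [if_neg h, if_pos h1, emod_small_neg h1 (by omega)]
    congr 1
    omega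

lemma pyGet?_mod (v : List Int) (i : Int) (h1 : -(v.length:Int) ≤ i) (h2 : i < (v.length:Int)) :
    PySem.List.pyGet? v i = some (PySem.List.pyGetD v (i % (v.length:Int)) 0) := by
  have hm0 : 0 ≤ i % (v.length:Int) := Int.emod_nonneg _ (by omega)
  have hm1 : i % (v.length:Int) < (v.length:Int) := Int.emod_lt_of_pos _ (by omega)
  rw [PySem.List.pyGetD_eq_getElem _ _ hm0 hm1]
  simp only [PySem.List.pyGet?, pyIdx?_eq v.length i h1 h2, Option.bind_some]
  exact List.getElem?_eq_getElem (by omega)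

lemma pySet?_mod (v : List Int) (i x : Int) (h1 : -(v.length:Int) ≤ i) (h2 : i < (v.length:Int)) :
    PySem.List.pySet? v i x = some (v.set (i % (v.length:Int)).toNat x) := by
  simp only [PySem.List.pySet?, pyIdx?_eq v.length i h1 h2, Option.map_some]

lemma pyGetD_set (v : List Int) (P : Nat) (x : Int) (_hP : P < v.length) (i : Int)
    (h0 : 0 ≤ i) (h1 : i < (v.length:Int)) :
    PySem.List.pyGetD (v.set P x) i 0 = if i = (P:Int) then x else PySem.List.pyGetD v i 0 := by
  rw [PySem.List.pyGetD_eq_getElem _ _ h0 (by simpa using h1),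
      PySem.List.pyGetD_eq_getElem _ _ h0 h1,
      List.getElem_set]
  by_cases h : i = (P:Int)
  · rw [if_pos h, if_pos (by omega)]
  · rw [if_neg h, if_neg (by omega)]

lemma sum_set_zero (v : List Int) (P : Nat) (hP : P < v.length) :
    v.sum = (v.set P 0).sum + PySem.List.pyGetD v (P:Int) 0 := by
  rw [PySem.List.pyGetD_eq_getElem _ _ (by omega) (by exact_mod_cast hP), List.sum_set,
    if_pos hP]
  conv_lhs => rw [← List.sum_take_add_sum_drop v P, List.drop_eq_getElem_cons hP]
  simp only [Int.toNat_natCast, List.sum_cons]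
  omega

-- the set of remaining nonzero positions, as B maintains it
def remChar (v : List Int) (p : Int) : List Int :=
  (PySem.List.pyRange 0 (v.length : Int) 1).filter
    (fun i => PySem.List.pyGetD v i 0 != 0 && i != p)

lemma mem_remChar {v : List Int} {p i : Int} :
    i ∈ remChar v p ↔ (0 ≤ i ∧ i < (v.length : Int) ∧ PySem.List.pyGetD v i 0 ≠ 0 ∧ i ≠ p) := by
  simp [remChar, List.mem_filter, PySem.List.mem_pyRange_one, and_assoc]

lemma nodup_remChar (v : List Int) (p : Int) : (remChar v p).Nodup := by
  apply List.Nodup.filter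
  rw [PySem.List.pyRange_zero_natCast]
  exact List.Nodup.map (fun a b h => by exact_mod_cast h) List.nodup_range

-- scan loops return the least offset whose cell is nonzero
lemma scanLt_spec (v : List Int) (idx : Int) (L : Int) (hL1 : 1 ≤ L)
    (hzero : ∀ d : Int, 1 ≤ d → d < L → PySem.List.pyGet? v (idx - d) = some 0)
    (hhit : ∃ y, PySem.List.pyGet? v (idx - L) = some y ∧ y ≠ 0) :
    ∀ (fuel : Nat) (l : Int), 1 ≤ l → l ≤ L → L < fuel + l →
      scanLt v idx fuel l = some L := by
  intro fuel
  induction fuel with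
  | zero => intro l h1 h2 h3; omega
  | succ f ih =>
    intro l h1 h2 h3
    by_cases hl : l = L
    · subst hl
      obtain ⟨y, hy, hy0⟩ := hhit
      simp [scanLt, hy, hy0]
    · have hlt : l < L := lt_of_le_of_ne h2 hl
      have h0 := hzero l h1 hlt
      simp only [scanLt, h0]
      rw [if_pos (by simp)]
      exact ih (l+1) (by omega) (by omega) (by omega)

lemma scanRt_spec (v : List Int) (idx : Int) (L : Int) (hL1 : 1 ≤ L)
    (hzero : ∀ d : Int, 1 ≤ d → d < L → PySem.List.pyGet? v (idx + d) = some 0)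
    (hhit : ∃ y, PySem.List.pyGet? v (idx + L) = some y ∧ y ≠ 0) :
    ∀ (fuel : Nat) (l : Int), 1 ≤ l → l ≤ L → L < fuel + l →
      scanRt v idx fuel l = some L := by
  intro fuel
  induction fuel with
  | zero => intro l h1 h2 h3; omega
  | succ f ih =>
    intro l h1 h2 h3
    by_cases hl : l = L
    · subst hl
      obtain ⟨y, hy, hy0⟩ := hhit
      simp [scanRt, hy, hy0]
    · have hlt : l < L := lt_of_le_of_ne h2 hl
      have h0 := hzero l h1 hlt
      simp only [scanRt, h0]
      rw [if_pos (by simp)]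
      exact ih (l+1) (by omega) (by omega) (by omega)

-- THE MAIN SIMULATION: A's loop over the mutated array equals B's loop over the
-- position set, under the traveled-window invariant [lo, hi] (unwrapped coordinates).
lemma loopAB : ∀ (fB fA : Nat) (v : List Int) (idx p lo hi ansA ansB : Int) (rem : List Int),
    0 < v.length →
    p = idx % (v.length:Int) →
    (idx = lo ∨ idx = hi) → lo ≤ 0 → 0 ≤ hi → hi - lo ≤ (v.length:Int) - 1 →
    (∀ j : Int, lo ≤ j → j ≤ hi → j ≠ idx →
        PySem.List.pyGetD v (j % (v.length:Int)) 0 = 0) →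
    rem = remChar (v.set ((idx % (v.length:Int)).toNat) 0) p →
    ansA + v.sum = ansB →
    rem.length + 1 ≤ fA → rem.length + 1 ≤ fB →
    loopA fA v idx ansA = loopB fB (v.length:Int) rem p ansB := by
  intro fB
  induction fB with
  | zero => intro fA v idx p lo hi ansA ansB rem _ _ _ _ _ _ _ _ _ _ h; omega
  | succ fB ih =>
    intro fA v idx p lo hi ansA ansB rem hn hp hidx hlo hhi hwid hwin hrem hans hfA hfB
    obtain ⟨fA', rfl⟩ : ∃ k, fA = k + 1 := ⟨fA - 1, by omega⟩
    have hloidx : lo ≤ idx ∧ idx ≤ hi := by rcases hidx with h | h <;> omega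
    have hidxlb : -(v.length:Int) ≤ idx := by omega
    have hidxub : idx < (v.length:Int) := by omega
    have hp0 : 0 ≤ p := hp ▸ Int.emod_nonneg _ (by omega)
    have hp1 : p < (v.length:Int) := hp ▸ Int.emod_lt_of_pos _ (by omega)
    have hpmod : idx % (v.length:Int) = p % (v.length:Int) := by
      rw [← hp, emod_small hp0 hp1]
    -- A: answer += v[idx]; v[idx] = 0
    set x : Int := PySem.List.pyGetD v p 0 with hxdef
    set w : List Int := v.set p.toNat 0 with hwdef
    have hlw : w.length = v.length := by rw [hwdef]; exact List.length_set ..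
    have hwn : (w.length : Int) = (v.length : Int) := by rw [hlw]
    have hgetA : PySem.List.pyGet? v idx = some x := by
      rw [pyGet?_mod v idx hidxlb hidxub, ← hp]
    have hptoNat : (p.toNat : Int) = p := by omega
    have hpn : p.toNat < v.length := by omega
    have hsetw : v.set ((idx % (v.length:Int)).toNat) 0 = w := by
      rw [hwdef, hp]
    have hsetA : PySem.List.pySet? v idx 0 = some w := by
      rw [pySet?_mod v idx 0 hidxlb hidxub, ← hp]
    -- w's cells
    have hgetw : ∀ i : Int, 0 ≤ i → i < (v.length:Int) →
        PySem.List.pyGetD w i 0 = if i = p then 0 else PySem.List.pyGetD v i 0 := by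
      intro i h0 h1
      rw [hwdef, pyGetD_set v p.toNat 0 hpn i h0 h1, hptoNat]
    have hwp : PySem.List.pyGetD w p 0 = 0 := by
      rw [hgetw p hp0 hp1, if_pos rfl]
    -- the whole window of w is zero
    have hwinw : ∀ j : Int, lo ≤ j → j ≤ hi →
        PySem.List.pyGetD w (j % (v.length:Int)) 0 = 0 := by
      intro j hj1 hj2
      have hm0 : 0 ≤ j % (v.length:Int) := Int.emod_nonneg _ (by omega)
      have hm1 : j % (v.length:Int) < (v.length:Int) := Int.emod_lt_of_pos _ (by omega)
      rw [hgetw _ hm0 hm1]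
      by_cases hjp : j % (v.length:Int) = p
      · rw [if_pos hjp]
      · rw [if_neg hjp]
        refine hwin j hj1 hj2 ?_
        intro hji
        exact hjp (by rw [hji, ← hp])
    -- rem characterization
    have hmemrem : ∀ q, q ∈ rem ↔
        (0 ≤ q ∧ q < (v.length:Int) ∧ PySem.List.pyGetD w q 0 ≠ 0 ∧ q ≠ p) := by
      intro q
      rw [hrem, hsetw, mem_remChar, hwn]
    have hzero' : ∀ i : Int, 0 ≤ i → i < (v.length:Int) → i ∉ rem →
        PySem.List.pyGetD w i 0 = 0 := by
      intro i h0 h1 hnot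
      by_cases hip : i = p
      · rw [hip]; exact hwp
      · by_contra hne
        exact hnot ((hmemrem i).2 ⟨h0, h1, hne, hip⟩)
    -- geometric fact: every remaining nonzero position lies strictly outside the window
    have hW : ∀ q ∈ rem, hi < q ∧ q < lo + (v.length:Int) := by
      intro q hq
      obtain ⟨h0, h1, hne, hqp⟩ := (hmemrem q).1 hq
      constructor
      · by_contra hle
        have := hwinw q (by omega) (by omega)
        rw [emod_small h0 h1] at this
        exact hne this
      · by_contra hge
        have := hwinw (q - (v.length:Int)) (by omega) (by omega)
        rw [Int.sub_emod_right, emod_small h0 h1] at this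
        exact hne this
    have hsum : v.sum = w.sum + x := by
      rw [hxdef, hwdef, ← hptoNat]
      exact sum_set_zero v p.toNat hpn
    by_cases hreme : rem = []
    · -- all cells of w are zero; both loops stop
      have hallz : ∀ y ∈ w, y = 0 := by
        intro y hy
        obtain ⟨j, hj, rfl⟩ := List.mem_iff_getElem.1 hy
        have hj' : (j:Int) < (v.length:Int) := by omega
        have := hzero' (j:Int) (by omega) hj' (by simp [hreme])
        rwa [PySem.List.pyGetD_natCast, List.getD_eq_getElem _ _ hj] at this
      have hanyf : (w.any (fun y => y != 0)) = false := by
        rw [Bool.eq_false_iff]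
        intro hcon
        obtain ⟨y, hy, hy0⟩ := List.any_eq_true.1 hcon
        simp only [bne_iff_ne, ne_eq] at hy0
        exact hy0 (hallz y hy)
      have hwsum : w.sum = 0 := List.sum_eq_zero hallz
      rw [hreme]
      simp only [loopA, hgetA, hsetA, hanyf, Bool.false_eq_true, if_false, loopB,
        List.isEmpty_nil, if_true]
      omega
    · -- rem nonempty: A scans, B queries mins
      obtain ⟨r0, hr0⟩ := List.exists_mem_of_ne_nil rem hreme
      have hie : rem.isEmpty = false := by
        rcases rem with _ | _
        · exact absurd rfl hreme
        · rfl
      -- A's any() is true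
      have hanyt : (w.any (fun y => y != 0)) = true := by
        refine List.any_eq_true.2 ?_
        obtain ⟨h0, h1, hne, hqp⟩ := (hmemrem r0).1 hr0
        have hlt' : r0.toNat < w.length := by omega
        refine ⟨w[r0.toNat], List.getElem_mem hlt', ?_⟩
        rw [PySem.List.pyGetD_eq_getElem _ _ h0 (by omega)] at hne
        simpa using hne
      -- B's two mins exist
      obtain ⟨lt, hmlt⟩ : ∃ m, PySem.List.min?
          (rem.map (fun q => PySem.Int.mod (p - q) (v.length:Int))) (fun x => x) = some m := by
        rcases h : PySem.List.min?
            (rem.map (fun q => PySem.Int.mod (p - q) (v.length:Int))) (fun x => x) with _ | m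
        · rw [PySem.List.min?_eq_none_iff, List.map_eq_nil_iff] at h
          exact absurd h hreme
        · exact ⟨m, rfl⟩
      obtain ⟨rt, hmrt⟩ : ∃ m, PySem.List.min?
          (rem.map (fun q => PySem.Int.mod (q - p) (v.length:Int))) (fun x => x) = some m := by
        rcases h : PySem.List.min?
            (rem.map (fun q => PySem.Int.mod (q - p) (v.length:Int))) (fun x => x) with _ | m
        · rw [PySem.List.min?_eq_none_iff, List.map_eq_nil_iff] at h
          exact absurd h hreme
        · exact ⟨m, rfl⟩
      have hmodeq : ∀ a : Int, PySem.Int.mod a (v.length:Int) = a % (v.length:Int) := fun a =>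
        PySem.Int.mod_eq_emod_of_pos (by omega)
      -- witnesses and minimality
      obtain ⟨q1, hq1mem, hq1⟩ : ∃ q ∈ rem, lt = (p - q) % (v.length:Int) := by
        obtain ⟨q, hq, hq'⟩ := List.mem_map.1 (PySem.List.min?_mem hmlt)
        exact ⟨q, hq, by rw [← hq', hmodeq]⟩
      have hminlt : ∀ q ∈ rem, lt ≤ (p - q) % (v.length:Int) := by
        intro q hq
        have := PySem.List.min?_isMin hmlt (PySem.Int.mod (p - q) (v.length:Int))
          (List.mem_map.2 ⟨q, hq, rfl⟩)
        rwa [hmodeq] at this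
      obtain ⟨q2, hq2mem, hq2⟩ : ∃ q ∈ rem, rt = (q - p) % (v.length:Int) := by
        obtain ⟨q, hq, hq'⟩ := List.mem_map.1 (PySem.List.min?_mem hmrt)
        exact ⟨q, hq, by rw [← hq', hmodeq]⟩
      have hminrt : ∀ q ∈ rem, rt ≤ (q - p) % (v.length:Int) := by
        intro q hq
        have := PySem.List.min?_isMin hmrt (PySem.Int.mod (q - p) (v.length:Int))
          (List.mem_map.2 ⟨q, hq, rfl⟩)
        rwa [hmodeq] at this
      -- explicit distances
      have hdisL : ∀ q ∈ rem, (p - q) % (v.length:Int) =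
          if q < p then p - q else p - q + (v.length:Int) := by
        intro q hq
        obtain ⟨h0, h1, _, hqp⟩ := (hmemrem q).1 hq
        by_cases h : q < p
        · rw [if_pos h, emod_small (by omega) (by omega)]
        · rw [if_neg h, emod_small_neg (by omega) (by omega)]
      have hdisR : ∀ q ∈ rem, (q - p) % (v.length:Int) =
          if p < q then q - p else q - p + (v.length:Int) := by
        intro q hq
        obtain ⟨h0, h1, _, hqp⟩ := (hmemrem q).1 hq
        by_cases h : p < q
        · rw [if_pos h, emod_small (by omega) (by omega)]
        · rw [if_neg h, emod_small_neg (by omega) (by omega)]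
      have hq1b := (hmemrem q1).1 hq1mem
      have hq2b := (hmemrem q2).1 hq2mem
      have hWq1 := hW q1 hq1mem
      have hWq2 := hW q2 hq2mem
      -- bounds on lt, rt
      have hlt1 : 1 ≤ lt := by
        rw [hq1, hdisL q1 hq1mem]
        rcases hq1b with ⟨h0, h1, _, hqp⟩
        split_ifs <;> omega
      have hltn : lt ≤ (v.length:Int) - 1 := by
        rw [hq1, hdisL q1 hq1mem]
        rcases hq1b with ⟨h0, h1, _, hqp⟩
        split_ifs <;> omega
      have hrt1 : 1 ≤ rt := by
        rw [hq2, hdisR q2 hq2mem]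
        rcases hq2b with ⟨h0, h1, _, hqp⟩
        split_ifs <;> omega
      have hrtn : rt ≤ (v.length:Int) - 1 := by
        rw [hq2, hdisR q2 hq2mem]
        rcases hq2b with ⟨h0, h1, _, hqp⟩
        split_ifs <;> omega
      -- p in terms of idx
      have hpidx : p = if idx < 0 then idx + (v.length:Int) else idx := by
        rw [hp]
        by_cases h : idx < 0
        · rw [if_pos h, emod_small_neg hidxlb h]
        · rw [if_neg h, emod_small (by omega) hidxub]
      -- left scan stays in range
      have hG2L : lt ≤ idx + (v.length:Int) - 1 := by
        rcases hidx with hL | hR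
        · rcases hq1b with ⟨h0, h1, _, hqp⟩
          rw [hq1, hdisL q1 hq1mem, hpidx]
          by_cases h : idx < 0
          · rw [if_pos h]; split_ifs <;> omega
          · rw [if_neg h]; split_ifs <;> omega
        · omega
      -- right scan stays in range
      have hG2R : idx + rt ≤ (v.length:Int) - 1 := by
        rcases hidx with hL | hR
        · omega
        · rcases hq2b with ⟨h0, h1, _, hqp⟩
          rw [hq2, hdisR q2 hq2mem, hpidx]
          have h' : ¬ idx < 0 := by omega
          rw [if_neg h']
          split_ifs <;> omega
      -- positions scanned before the hit are zero
      have hZL : ∀ d : Int, 1 ≤ d → d < lt →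
          PySem.List.pyGetD w ((idx - d) % (v.length:Int)) 0 = 0 := by
        intro d hd1 hd2
        rw [sub_emod_congr hpmod]
        set pd := (p - d) % (v.length:Int) with hpd
        have hm0 : 0 ≤ pd := Int.emod_nonneg _ (by omega)
        have hm1 : pd < (v.length:Int) := Int.emod_lt_of_pos _ (by omega)
        refine hzero' pd hm0 hm1 ?_
        intro hmem
        have hdist : (p - pd) % (v.length:Int) = d := by
          rw [hpd, sub_emod_congr' (Int.emod_emod_of_dvd _ dvd_rfl),
            show p - (p - d) = d by ring]
          exact emod_small (by omega) (by omega)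
        have := hminlt pd hmem
        omega
      have hZR : ∀ d : Int, 1 ≤ d → d < rt →
          PySem.List.pyGetD w ((idx + d) % (v.length:Int)) 0 = 0 := by
        intro d hd1 hd2
        rw [add_emod_congr hpmod]
        set pd := (p + d) % (v.length:Int) with hpd
        have hm0 : 0 ≤ pd := Int.emod_nonneg _ (by omega)
        have hm1 : pd < (v.length:Int) := Int.emod_lt_of_pos _ (by omega)
        refine hzero' pd hm0 hm1 ?_
        intro hmem
        have hdist : (pd - p) % (v.length:Int) = d := by
          rw [hpd, sub_emod_congr (Int.emod_emod_of_dvd _ dvd_rfl),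
            show p + d - p = d by ring]
          exact emod_small (by omega) (by omega)
        have := hminrt pd hmem
        omega
      -- the hit positions
      have htL : (idx - lt) % (v.length:Int) = q1 := by
        rw [sub_emod_congr hpmod, hq1,
          sub_emod_congr' (Int.emod_emod_of_dvd _ dvd_rfl),
          show p - (p - q1) = q1 by ring]
        exact emod_small hq1b.1 hq1b.2.1
      have htR : (idx + rt) % (v.length:Int) = q2 := by
        rw [add_emod_congr hpmod, hq2,
          add_emod_congr' (Int.emod_emod_of_dvd _ dvd_rfl),
          show p + (q2 - p) = q2 by ring]
        exact emod_small hq2b.1 hq2b.2.1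
      -- scans succeed
      have hscanL : scanLt w idx (2 * w.length + 2) 1 = some lt := by
        refine scanLt_spec w idx lt hlt1 ?_ ?_ _ 1 (by omega) (by omega) (by omega)
        · intro d hd1 hd2
          rw [pyGet?_mod w (idx - d) (by omega) (by omega), hwn, hZL d hd1 hd2]
        · refine ⟨PySem.List.pyGetD w q1 0, ?_, hq1b.2.2.1⟩
          rw [pyGet?_mod w (idx - lt) (by omega) (by omega), hwn, htL]
      have hscanR : scanRt w idx (2 * w.length + 2) 1 = some rt := by
        refine scanRt_spec w idx rt hrt1 ?_ ?_ _ 1 (by omega) (by omega) (by omega)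
        · intro d hd1 hd2
          rw [pyGet?_mod w (idx + d) (by omega) (by omega), hwn, hZR d hd1 hd2]
        · refine ⟨PySem.List.pyGetD w q2 0, ?_, hq2b.2.2.1⟩
          rw [pyGet?_mod w (idx + rt) (by omega) (by omega), hwn, htR]
      -- targets lie strictly outside the old window
      have hnewL : idx - lt < lo := by
        by_contra hge
        have := hwinw (idx - lt) (by omega) (by omega)
        rw [htL] at this
        exact hq1b.2.2.1 this
      have hnewR : hi < idx + rt := by
        by_contra hge
        have := hwinw (idx + rt) (by omega) (by omega)
        rw [htR] at this
        exact hq2b.2.2.1 this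
      -- unwrapped coordinates of the targets
      have hcoordL : idx - lt + (v.length:Int) = q1 := by
        have := htL
        rw [emod_small_neg (by omega) (by omega)] at this
        omega
      have hcoordR : idx + rt = q2 := by
        by_cases h1 : 0 ≤ idx + rt
        · have := htR
          rwa [emod_small h1 (by omega)] at this
        · exfalso; omega
      -- erase facts
      have hremnd : rem.Nodup := by rw [hrem]; exact nodup_remChar _ _
      have herase : ∀ t ∈ rem, PySem.List.remove? rem t = some (rem.erase t) :=
        fun t ht => PySem.List.remove?_eq_some_erase rem t ht
      have heraselen : ∀ t ∈ rem, (rem.erase t).length + 1 = rem.length := fun t ht => by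
        rw [List.length_erase_of_mem ht]
        have := List.length_pos_of_mem ht
        omega
      -- the rem after zeroing a target t is rem.erase t
      have hremnew : ∀ t ∈ rem, rem.erase t = remChar (w.set t.toNat 0) t := by
        intro t ht
        obtain ⟨ht0, ht1, htnz, htp⟩ := (hmemrem t).1 ht
        have httoNat : (t.toNat : Int) = t := by omega
        have htn : t.toNat < w.length := by omega
        rw [List.Nodup.erase_eq_filter hremnd, hrem, hsetw]
        unfold remChar
        rw [List.filter_filter]
        rw [show ((w.set t.toNat 0).length) = w.length from List.length_set ..]
        refine List.filter_congr ?_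
        intro i hi'
        have hi0 : 0 ≤ i := (PySem.List.mem_pyRange_one.1 hi').1
        have hi1 : i < (w.length:Int) := (PySem.List.mem_pyRange_one.1 hi').2
        rw [pyGetD_set w t.toNat 0 htn i hi0 hi1, httoNat]
        rw [Bool.eq_iff_iff]
        simp only [Bool.and_eq_true, bne_iff_ne, ne_eq]
        by_cases hit : i = t
        · subst hit
          simp
        · rw [if_neg hit]
          by_cases hip : i = p
          · subst hip
            rw [hwp]
            tauto
          · tauto
      -- step both loops
      simp only [loopA, hgetA, hsetA, hanyt, if_true, hscanL, hscanR]
      simp only [loopB, hie, Bool.false_eq_true, if_false, hmlt, hmrt]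
      have hpc : PySem.Int.mod (p - lt) (v.length:Int) = q1 := by
        rw [hmodeq, sub_emod_congr hpmod.symm]
        exact htL
      have hpc' : PySem.Int.mod (p + rt) (v.length:Int) = q2 := by
        rw [hmodeq, add_emod_congr hpmod.symm]
        exact htR
      by_cases hcmp : lt < rt
      · rw [if_pos hcmp, if_pos hcmp]
        simp only [hpc, herase q1 hq1mem]
        have := ih fA' w (idx - lt) q1 (idx - lt) hi (ansA + x + lt) (ansB + lt)
          (rem.erase q1) (by omega)
          (by rw [hwn]; exact htL.symm)
          (Or.inl rfl) (by omega) hhi (by rw [hwn]; omega)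
          ?_ ?_ (by omega) ?_ ?_
        · rw [hwn] at this
          exact this
        · intro j hj1 hj2 hj3
          rw [hwn]
          by_cases hcase : lo ≤ j
          · exact hwinw j hcase hj2
          · have := hZL (idx - j) (by omega) (by omega)
            rwa [show idx - (idx - j) = j by ring] at this
        · rw [hwn, htL]
          exact hremnew q1 hq1mem
        · have := heraselen q1 hq1mem; omega
        · have := heraselen q1 hq1mem; omega
      · rw [if_neg hcmp, if_neg hcmp]
        simp only [hpc', herase q2 hq2mem]
        have := ih fA' w (idx + rt) q2 lo (idx + rt) (ansA + x + rt) (ansB + rt)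
          (rem.erase q2) (by omega)
          (by rw [hwn]; exact htR.symm)
          (Or.inr rfl) hlo (by omega) (by rw [hwn]; omega)
          ?_ ?_ (by omega) ?_ ?_
        · rw [hwn] at this
          exact this
        · intro j hj1 hj2 hj3
          rw [hwn]
          by_cases hcase : j ≤ hi
          · exact hwinw j hj1 hcase
          · have := hZR (j - idx) (by omega) (by omega)
            rwa [show idx + (j - idx) = j by ring] at this
        · rw [hwn, htR]
          exact hremnew q2 hq2mem
        · have := heraselen q2 hq2mem; omega
        · have := heraselen q2 hq2mem; omega

-- initial state: apply the simulation at position 0 with an empty window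
lemma assemble (vals : List Int) (L : Nat) (hn : 0 < vals.length) (hL : vals.length ≤ L) :
    loopA (L + 1) vals 0 0 =
      loopB (((PySem.List.pyRange 0 (vals.length:Int) 1).filter
                (fun i => PySem.List.pyGetD vals i 0 != 0 && i != 0)).length + 1)
            (vals.length:Int)
            ((PySem.List.pyRange 0 (vals.length:Int) 1).filter
                (fun i => PySem.List.pyGetD vals i 0 != 0 && i != 0))
            0 vals.sum := by
  have hrlen : ((PySem.List.pyRange 0 (vals.length:Int) 1).filter
      (fun i => PySem.List.pyGetD vals i 0 != 0 && i != 0)).length ≤ vals.length := by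
    have h1 := List.length_filter_le
      (fun i => PySem.List.pyGetD vals i 0 != 0 && i != 0)
      (PySem.List.pyRange 0 (vals.length:Int) 1)
    have h2 : (PySem.List.pyRange 0 (vals.length:Int) 1).length = vals.length := by
      rw [PySem.List.length_pyRange_one]
      omega
    omega
  refine loopAB _ (L + 1) vals 0 0 0 0 0 vals.sum _
    hn (by simp) (Or.inl rfl) le_rfl le_rfl (by omega)
    (by intro j h1 h2 h3; omega)
    ?_ (by omega) (by omega) (by omega)
  rw [show (((0:Int) % (vals.length:Int)).toNat) = 0 by simp]
  unfold remChar
  rw [show ((vals.set 0 0).length) = vals.length from List.length_set ..]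
  refine List.filter_congr ?_
  intro i hi'
  have hi0 : 0 ≤ i := (PySem.List.mem_pyRange_one.1 hi').1
  have hi1 : i < (vals.length:Int) := (PySem.List.mem_pyRange_one.1 hi').2
  rw [pyGetD_set vals 0 0 hn i hi0 hi1]
  by_cases h : i = 0
  · subst h; simp
  · rw [if_neg (by exact_mod_cast h)]

-- ===== VERDICT (by name: the statement is the Claim_ definition above) =====
theorem solution_spec : Claim_equal_solution := by
  unfold Claim_equal_solution
  intro name _ hpre
  unfold Spec_solution solution solution_alt solNumsA
  have hne : name.toList ≠ [] := by simpa using hpre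
  have hlen : (name.toList.map
      (fun c => min ((c.toNat : Int) - 65) (90 - (c.toNat : Int) + 1))).length
      = name.toList.length := List.length_map ..
  have hn : 0 < (name.toList.map
      (fun c => min ((c.toNat : Int) - 65) (90 - (c.toNat : Int) + 1))).length := by
    rw [hlen]
    exact List.length_pos_of_ne_nil hne
  rw [← hlen]
  exact assemble _ _ hn (by omega)
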